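-- pv_equiv track=rewrite | github.com/fxbabin/npuzzle | heuristic.py | generate_rows_cols
-- ===== SOURCE A (Python) =====
-- def generate_rows_cols(puzzle_list, size):
--     rows = []
--     for i in range(size):
--         tmp = puzzle_list[i * size:(i + 1) * size]
--         rows.append(tmp)
--
--     cols = []
--     for i in range(size):
--         tmp = []
--         for y in range(size):
--             tmp.append(puzzle_list[i + (y * size)])
--         cols.append(tmp)
--
--     return rows, cols
-- ===== SOURCE B (Python) =====
-- def generate_rows_cols(puzzle_list, size):
--     if size <= 0:
--         return [], []
--     rows = [[] for _ in range(size)]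
--     cols = [[] for _ in range(size)]
--     for k in range(size * size):
--         v = puzzle_list[k]
--         rows[k // size].append(v)
--         cols[k % size].append(v)
--     return rows, cols
-- ===== Notes on version B (the rewrite author's own statement) =====
-- stated objective: alternative
-- what changed: B makes a single pass over the flat indices, distributing each element into its row bucket (k // size) and its column bucket (k % size) simultaneously, instead of A's two staged passes (row slicing, then a nested index-arithmetic column loop).
import Mathlib
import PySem

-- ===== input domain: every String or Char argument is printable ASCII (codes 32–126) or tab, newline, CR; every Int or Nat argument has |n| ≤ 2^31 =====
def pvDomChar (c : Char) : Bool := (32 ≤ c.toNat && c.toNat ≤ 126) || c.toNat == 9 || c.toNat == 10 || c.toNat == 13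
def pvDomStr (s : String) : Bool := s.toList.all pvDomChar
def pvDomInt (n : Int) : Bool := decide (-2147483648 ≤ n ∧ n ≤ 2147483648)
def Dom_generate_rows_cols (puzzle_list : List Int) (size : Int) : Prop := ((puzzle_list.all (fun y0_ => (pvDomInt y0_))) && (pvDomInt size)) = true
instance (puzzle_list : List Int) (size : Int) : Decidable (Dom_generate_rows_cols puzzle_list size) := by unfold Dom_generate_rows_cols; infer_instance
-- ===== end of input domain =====

-- B replaces A's two staged passes (row slicing, then a nested index-arithmetic column loop)
-- by ONE pass over the flat indices that distributes each element into its row bucket (k // size)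
-- and its column bucket (k % size) simultaneously (same cost, different decomposition).

-- ===== PORT A =====
def generate_rows_cols (puzzle_list : List Int) (size : Int) : List (List Int) × List (List Int) :=
  let rows := (PySem.List.pyRange 0 size 1).foldl
    (fun acc i => acc ++ [PySem.List.slice puzzle_list (some (i * size)) (some ((i + 1) * size))]) []
  let cols := (PySem.List.pyRange 0 size 1).foldl
    (fun acc i => acc ++ [(PySem.List.pyRange 0 size 1).foldl
      (fun tmp y => tmp ++ [PySem.List.pyGetD puzzle_list (i + y * size) 0]) []]) []
  (rows, cols)

-- ===== PORT B =====
-- bs[i].append(v): i is produced by k//size resp. k%size with 0 ≤ i < len bs, so .toNat is exact there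
def pvBucketPut (bs : List (List Int)) (i : Int) (v : Int) : List (List Int) :=
  bs.modify i.toNat (fun row => row ++ [v])

def generate_rows_cols_alt (puzzle_list : List Int) (size : Int) : List (List Int) × List (List Int) :=
  if size ≤ 0 then ([], [])
  else
    let init : List (List Int) := (PySem.List.pyRange 0 size 1).map (fun _ => ([] : List Int))
    (PySem.List.pyRange 0 (size * size) 1).foldl
      (fun st k =>
        let v := PySem.List.pyGetD puzzle_list k 0
        (pvBucketPut st.1 (PySem.Int.floordiv k size) v,
         pvBucketPut st.2 (PySem.Int.mod k size) v))
      (init, init)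

-- ===== PRECONDITION & SPEC =====
-- Pre_ excludes exactly the inputs where A raises IndexError (its column loop reads flat index
-- size*size - 1, so it raises whenever 0 < size and len(puzzle_list) < size*size); B raises there too.
def Pre_generate_rows_cols (puzzle_list : List Int) (size : Int) : Prop :=
  size ≤ 0 ∨ size * size ≤ (puzzle_list.length : Int)
instance (puzzle_list : List Int) (size : Int) : Decidable (Pre_generate_rows_cols puzzle_list size) := by
  unfold Pre_generate_rows_cols; infer_instance
def pvWitness_generate_rows_cols : List Int × Int := ([1, 2, 3, 4], 2)

def Spec_generate_rows_cols (puzzle_list : List Int) (size : Int) (out : List (List Int) × List (List Int)) : Prop := out = generate_rows_cols_alt puzzle_list size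
instance (puzzle_list : List Int) (size : Int) (out : List (List Int) × List (List Int)) : Decidable (Spec_generate_rows_cols puzzle_list size out) := by unfold Spec_generate_rows_cols; infer_instance

-- ===== CLAIM (what is proved, stated in full; the proofs are below) =====
def Claim_equal_generate_rows_cols : Prop := ∀ (puzzle_list : List Int) (size : Int), Dom_generate_rows_cols puzzle_list size → Pre_generate_rows_cols puzzle_list size → Spec_generate_rows_cols puzzle_list size (generate_rows_cols puzzle_list size)

-- ===== LEMMAS AND PROOFS =====

-- the bucket-distribution fold, characterised: bucket i ends up with the images of the keys mapped to i
theorem pv_bucket_fold (f : Int → Nat) (g : Int → Int) :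
    ∀ (ks : List Int) (bs : List (List Int)),
      ks.foldl (fun acc k => acc.modify (f k) (fun row => row ++ [g k])) bs
        = bs.mapIdx (fun i b => b ++ (ks.filter (fun k => f k == i)).map g) := by
  intro ks
  induction ks with
  | nil =>
    intro bs
    apply List.ext_getElem
    · simp
    · intro j h1 h2; simp [List.getElem_mapIdx]
  | cons k ks ih =>
    intro bs
    simp only [List.foldl_cons, ih]
    apply List.ext_getElem
    · simp
    · intro j h1 h2
      simp only [List.getElem_mapIdx, List.getElem_modify, List.filter_cons]
      by_cases hj : f k = j
      · simp [hj]
      · simp [hj]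

theorem pv_mapIdx_const_nil (n : Nat) (F : Nat → List Int → List Int) :
    ((List.range n).map (fun _ => ([] : List Int))).mapIdx (fun i b => F i b)
      = (List.range n).map (fun i => F i []) := by
  apply List.ext_getElem
  · simp
  · intro j h1 h2
    simp [List.getElem_mapIdx]

-- which flat indices land in row bucket i
theorem pv_filter_div (s i : Nat) (hs : 0 < s) :
    ∀ a, (List.range (a * s)).filter (fun k => k / s == i)
      = if i < a then (List.range s).map (fun y => i * s + y) else [] := by
  intro a
  induction a with
  | zero => simp
  | succ a ih =>
    have hadd : (a + 1) * s = a * s + s := by ring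
    rw [hadd, List.range_add, List.filter_append, ih, List.filter_map]
    have hblk : (List.range s).filter ((fun k => k / s == i) ∘ (fun x => a * s + x))
        = if i = a then List.range s else [] := by
      have hcong : ∀ y ∈ List.range s,
          ((fun k => k / s == i) ∘ (fun x => a * s + x)) y = (i == a) := by
        intro y hy
        have hy' : y < s := List.mem_range.mp hy
        have : (a * s + y) / s = a := by
          rw [mul_comm a s, Nat.mul_add_div hs, Nat.div_eq_of_lt hy']; omega
        simp only [Function.comp_apply, this]
        simp [eq_comm]
      rw [List.filter_congr hcong]
      by_cases h : i = a <;> simp [h]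
    rw [hblk]
    by_cases h1 : i < a
    · have h2 : i ≠ a := by omega
      simp [h1, h2, show i < a + 1 by omega]
    · by_cases h2 : i = a
      · simp [h2]
      · simp [h1, h2, show ¬ i < a + 1 by omega]

theorem pv_filter_beq (s j : Nat) :
    (List.range s).filter (fun y => y == j) = if j < s then [j] else [] := by
  induction s with
  | zero => simp
  | succ s ih =>
    rw [List.range_succ, List.filter_append, ih]
    by_cases h1 : j < s
    · have h2 : s ≠ j := by omega
      simp [h1, h2, show j < s + 1 by omega]
    · by_cases h2 : s = j
      · simp [h2]
      · simp [h1, h2, show ¬ j < s + 1 by omega]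

-- which flat indices land in column bucket j
theorem pv_filter_mod (s j : Nat) (hj : j < s) :
    ∀ a, (List.range (a * s)).filter (fun k => k % s == j)
      = (List.range a).map (fun y => y * s + j) := by
  intro a
  induction a with
  | zero => simp
  | succ a ih =>
    have hadd : (a + 1) * s = a * s + s := by ring
    rw [hadd, List.range_add, List.filter_append, ih, List.filter_map]
    have hcong : ∀ y ∈ List.range s,
        ((fun k => k % s == j) ∘ (fun x => a * s + x)) y = (y == j) := by
      intro y hy
      have hy' : y < s := List.mem_range.mp hy
      have : (a * s + y) % s = y := by
        rw [Nat.mul_add_mod', Nat.mod_eq_of_lt hy']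
      simp [this]
    rw [List.filter_congr hcong, pv_filter_beq s j, if_pos hj,
      List.range_succ, List.map_append]
    simp

-- cast facts for the ranges
theorem pv_range_cast (s : Nat) : PySem.List.pyRange 0 (s : Int) 1 = (List.range s).map (fun k : Nat => (k : Int)) := by
  rw [PySem.List.pyRange_one]
  simp only [Int.sub_zero, Int.toNat_natCast, zero_add]

theorem pv_range_cast_sq (s : Nat) : PySem.List.pyRange 0 ((s : Int) * (s : Int)) 1 = (List.range (s * s)).map (fun k : Nat => (k : Int)) := by
  rw [PySem.List.pyRange_one]
  have : ((s : Int) * (s : Int) - 0).toNat = s * s := by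
    rw [Int.sub_zero, ← Nat.cast_mul, Int.toNat_natCast]
  rw [this]
  simp only [zero_add]

-- B's row buckets, characterised
theorem pv_B_rows (l : List Int) (s : Nat) (hs : 0 < s) :
    ((List.range (s * s)).map (fun k : Nat => (k : Int))).foldl
        (fun acc k => acc.modify (PySem.Int.floordiv k (s : Int)).toNat
          (fun row => row ++ [PySem.List.pyGetD l k 0]))
        ((List.range s).map (fun _ => ([] : List Int)))
      = (List.range s).map (fun i => (List.range s).map (fun y => PySem.List.pyGetD l ((i * s + y : Nat) : Int) 0)) := by
  rw [pv_bucket_fold (fun k => (PySem.Int.floordiv k (s : Int)).toNat) (fun k => PySem.List.pyGetD l k 0),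
      pv_mapIdx_const_nil]
  apply List.map_congr_left
  intro i hi
  have hi' : i < s := List.mem_range.mp hi
  rw [List.filter_map]
  have hc : ∀ k ∈ List.range (s * s),
      ((fun k => (PySem.Int.floordiv k (s : Int)).toNat == i) ∘ (fun k : Nat => (k : Int))) k = (k / s == i) := by
    intro k _
    simp only [Function.comp_apply, PySem.Int.floordiv_natCast, Int.toNat_natCast]
  rw [List.filter_congr hc, pv_filter_div s i hs (s), if_pos hi']
  simp [List.map_map, Function.comp_def]

-- B's column buckets, characterised
theorem pv_B_cols (l : List Int) (s : Nat) :
    ((List.range (s * s)).map (fun k : Nat => (k : Int))).foldl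
        (fun acc k => acc.modify (PySem.Int.mod k (s : Int)).toNat
          (fun row => row ++ [PySem.List.pyGetD l k 0]))
        ((List.range s).map (fun _ => ([] : List Int)))
      = (List.range s).map (fun j => (List.range s).map (fun y => PySem.List.pyGetD l ((y * s + j : Nat) : Int) 0)) := by
  rw [pv_bucket_fold (fun k => (PySem.Int.mod k (s : Int)).toNat) (fun k => PySem.List.pyGetD l k 0),
      pv_mapIdx_const_nil]
  apply List.map_congr_left
  intro j hj
  have hj' : j < s := List.mem_range.mp hj
  rw [List.filter_map]
  have hc : ∀ k ∈ List.range (s * s),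
      ((fun k => (PySem.Int.mod k (s : Int)).toNat == j) ∘ (fun k : Nat => (k : Int))) k = (k % s == j) := by
    intro k _
    simp only [Function.comp_apply, PySem.Int.mod_natCast, Int.toNat_natCast]
  rw [List.filter_congr hc, pv_filter_mod s j hj' (s)]
  simp [List.map_map, Function.comp_def]

-- A's row i equals the element-by-element reading, given the list is long enough
theorem pv_slice_eq_map (l : List Int) (s i : Nat) (hi : i < s) (hlen : s * s ≤ l.length) :
    PySem.List.slice l (some ((i : Int) * (s : Int))) (some (((i : Int) + 1) * (s : Int)))
      = (List.range s).map (fun y => PySem.List.pyGetD l ((i * s + y : Nat) : Int) 0) := by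
  have e1 : (i : Int) * (s : Int) = ((i * s : Nat) : Int) := by push_cast; ring
  have e2 : ((i : Int) + 1) * (s : Int) = (((i + 1) * s : Nat) : Int) := by push_cast; ring
  rw [e1, e2, PySem.List.slice_natCast]
  have hb : (i + 1) * s - i * s = s := by ring_nf; omega
  rw [hb]
  have hlen2 : i * s + s ≤ l.length := by nlinarith
  apply List.ext_getElem
  · simp
    omega
  · intro y h1 h2
    have hy : y < s := by simp at h1; omega
    rw [List.getElem_take, List.getElem_drop, List.getElem_map, List.getElem_range,
        PySem.List.pyGetD_natCast]
    rw [List.getD_eq_getElem l 0 (by omega)]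

theorem generate_rows_cols_spec : Claim_equal_generate_rows_cols := by
  intro l size _ hpre
  unfold Spec_generate_rows_cols generate_rows_cols generate_rows_cols_alt
  by_cases hsz : size ≤ 0
  · rw [if_pos hsz]
    have hnil : PySem.List.pyRange 0 size 1 = [] := by
      rw [PySem.List.pyRange_one]
      have : (size - 0).toNat = 0 := by omega
      rw [this]
      simp
    simp [hnil]
  · rw [if_neg hsz]
    have hs0 : 0 < size := by omega
    obtain ⟨s, hcast, hspos⟩ : ∃ s : Nat, (s : Int) = size ∧ 0 < s :=
      ⟨size.toNat, by omega, by omega⟩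
    have hlen : s * s ≤ l.length := by
      rcases hpre with h | h
      · omega
      · have : ((s * s : Nat) : Int) ≤ (l.length : Int) := by push_cast; rw [hcast]; exact h
        exact_mod_cast this
    rw [← hcast, pv_range_cast, pv_range_cast_sq]
    rw [PySem.List.foldl_prod_mk
      (f := fun acc k => pvBucketPut acc (PySem.Int.floordiv k (s : Int)) (PySem.List.pyGetD l k 0))
      (g := fun acc k => pvBucketPut acc (PySem.Int.mod k (s : Int)) (PySem.List.pyGetD l k 0))]
    simp only [pvBucketPut]
    have hinit : List.map (fun _ : Int => ([] : List Int)) (List.map (fun k : Nat => (k : Int)) (List.range s))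
        = List.map (fun _ : Nat => ([] : List Int)) (List.range s) := by
      simp [List.map_map, Function.comp_def]
    rw [hinit, pv_B_rows l s hspos, pv_B_cols l s]
    refine Prod.mk.injEq .. ▸ ⟨?_, ?_⟩
    · rw [PySem.List.foldl_append_singleton_eq_map, List.nil_append, List.map_map]
      apply List.map_congr_left
      intro i hi
      have hi' : i < s := List.mem_range.mp hi
      simpa using pv_slice_eq_map l s i hi' hlen
    · rw [PySem.List.foldl_append_singleton_eq_map, List.nil_append, List.map_map]
      apply List.map_congr_left
      intro j hj
      have hj' : j < s := List.mem_range.mp hj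
      simp only [Function.comp_apply]
      rw [PySem.List.foldl_append_singleton_eq_map, List.nil_append, List.map_map]
      apply List.map_congr_left
      intro y hy
      have hy' : y < s := List.mem_range.mp hy
      simp only [Function.comp_apply]
      congr 1
      push_cast
      ring
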